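-- pv_equiv track=rewrite | github.com/DragunWF/Competitive-Programming | CodeWars/python/7_kyu/drawing_a_cross.py | draw_a_cross
-- ===== SOURCE A (Python) =====
-- def draw_a_cross(n: int) -> str:
--     if n < 3:
--         return "Not possible to draw cross for grids less than 3x3!"
--     if n % 2 == 0:
--         return "Centered cross not possible!"
--
--     first_half = []
--     for i in range(n // 2):
--         row = get_row(n)
--         row[i] = "x"
--         row[-1 - i] = "x"
--         first_half.append("".join(row))
--
--     middle_row = get_row(n)
--     middle_row[n // 2] = "x"
--     middle_row = "".join(middle_row)
--
--     second_half = list(reversed([*first_half]))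
--     cross = [*first_half, middle_row, *second_half]
--
--     return "\n".join(cross)
--
-- def get_row(n: int) -> str:
--     return [*(" " * n)]
-- ===== SOURCE B (Python) =====
-- def draw_a_cross(n: int) -> str:
--     if n < 3:
--         return "Not possible to draw cross for grids less than 3x3!"
--     if n % 2 == 0:
--         return "Centered cross not possible!"
--     return "\n".join(
--         "".join("x" if j == i or j == n - 1 - i else " " for j in range(n))
--         for i in range(n)
--     )
-- ===== Notes on version B (the rewrite author's own statement) =====
-- stated objective: simpler
-- what changed: B replaces A's build-half-rows-by-index-assignment, make-middle, mirror-and-concatenate construction with a single uniform comprehension that computes every cell directly from the predicate j == i or j == n-1-i.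
import Mathlib
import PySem

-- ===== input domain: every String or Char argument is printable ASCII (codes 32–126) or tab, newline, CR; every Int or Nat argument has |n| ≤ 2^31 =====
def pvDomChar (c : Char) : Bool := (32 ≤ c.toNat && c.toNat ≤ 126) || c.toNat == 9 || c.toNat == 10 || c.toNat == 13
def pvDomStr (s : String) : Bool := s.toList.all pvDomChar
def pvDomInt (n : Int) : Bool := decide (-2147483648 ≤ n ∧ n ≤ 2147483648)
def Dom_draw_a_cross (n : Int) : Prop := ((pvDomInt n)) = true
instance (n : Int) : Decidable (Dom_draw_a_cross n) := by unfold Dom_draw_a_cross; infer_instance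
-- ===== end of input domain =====

-- B replaces A's build-first-half / middle-row / mirror construction by one uniform pass that
-- computes every cell from the predicate j == i or j == n-1-i; objective: simpler, same cost.

-- ===== PORT A =====
-- get_row(n) = [*(" " * n)]: a list of n single-space characters (" " * n is empty for n ≤ 0)
def pv_get_row (n : Int) : List Char := List.replicate n.toNat ' '

-- one first-half row: row = get_row(n); row[i] = "x"; row[-1 - i] = "x"; "".join(row)
-- (pySetD is exact here: within the loop both indices are always in range)
def pvARow (n i : Int) : String :=
  String.ofList (PySem.List.pySetD (PySem.List.pySetD (pv_get_row n) i 'x') (-1 - i) 'x')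

def draw_a_cross (n : Int) : String :=
  if n < 3 then "Not possible to draw cross for grids less than 3x3!"
  else if PySem.Int.mod n 2 = 0 then "Centered cross not possible!"
  else
    let first_half := (PySem.List.pyRange 0 (PySem.Int.floordiv n 2) 1).map (pvARow n)
    let middle_row := String.ofList
      (PySem.List.pySetD (pv_get_row n) (PySem.Int.floordiv n 2) 'x')
    let second_half := first_half.reverse
    PySem.Str.join "\n" (first_half ++ [middle_row] ++ second_half)

-- ===== PORT B =====
-- "".join("x" if j == i or j == n - 1 - i else " " for j in range(n))
def pvBRow (n i : Int) : String :=
  String.ofList ((PySem.List.pyRange 0 n 1).map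
    (fun j => if j = i ∨ j = n - 1 - i then 'x' else ' '))

def draw_a_cross_alt (n : Int) : String :=
  if n < 3 then "Not possible to draw cross for grids less than 3x3!"
  else if PySem.Int.mod n 2 = 0 then "Centered cross not possible!"
  else PySem.Str.join "\n" ((PySem.List.pyRange 0 n 1).map (pvBRow n))

-- ===== PRECONDITION & SPEC =====
def Spec_draw_a_cross (n : Int) (out : String) : Prop := out = draw_a_cross_alt n
instance (n : Int) (out : String) : Decidable (Spec_draw_a_cross n out) := by unfold Spec_draw_a_cross; infer_instance

-- ===== CLAIM (what is proved, stated in full; the proofs are below) =====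
def Claim_equal_draw_a_cross : Prop := ∀ (n : Int), Dom_draw_a_cross n → Spec_draw_a_cross n (draw_a_cross n)

-- ===== LEMMAS AND PROOFS =====

theorem pv_row_chars (m a b : Nat) (ha : a < m) (hb : b < m) :
    ((List.replicate m ' ').set a 'x').set b 'x'
      = (List.range m).map (fun j => if j = a ∨ j = b then 'x' else ' ') := by
  apply List.ext_getElem
  · simp
  · intro j h1 h2
    simp only [List.getElem_set, List.getElem_replicate, List.getElem_map, List.getElem_range]
    rcases eq_or_ne j a with rfl | hja <;> rcases eq_or_ne j b with rfl | hjb <;>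
      simp_all [eq_comm]

theorem pv_brow_chars (n i : Int) (hi : 0 ≤ i) (hi2 : i < n) :
    pvBRow n i = String.ofList ((List.range n.toNat).map
      (fun j => if j = i.toNat ∨ j = (n - 1 - i).toNat then 'x' else ' ')) := by
  unfold pvBRow
  apply congrArg
  rw [PySem.List.pyRange_one, List.map_map]
  simp only [sub_zero]
  apply List.map_congr_left
  intro j hj
  simp only [List.mem_range] at hj
  simp only [Function.comp_apply, zero_add]
  split_ifs <;> first | rfl | omega

theorem pv_brow_symm (n i : Int) : pvBRow n i = pvBRow n (n - 1 - i) := by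
  unfold pvBRow
  apply congrArg
  apply List.map_congr_left
  intro j _
  split_ifs <;> first | rfl | omega

theorem pv_arow_eq (n : Int) (i : Nat) (h : (i : Int) < PySem.Int.floordiv n 2) (hn : 3 ≤ n) :
    pvARow n i = pvBRow n i := by
  have hk : PySem.Int.floordiv n 2 = n / 2 := by
    simp [PySem.Int.floordiv, Int.fdiv_eq_ediv]
  rw [hk] at h
  have hin : (i : Int) < n := by omega
  have hm : 1 + i < n.toNat := by omega
  unfold pvARow pv_get_row
  rw [PySem.List.pySetD_of_nonneg (List.replicate n.toNat ' ') 'x' (show (0:Int) ≤ (i:Int) by positivity)]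
  have hset : PySem.List.pySetD ((List.replicate n.toNat ' ').set (i:Int).toNat 'x') (-1 - i) 'x'
      = ((List.replicate n.toNat ' ').set (i:Int).toNat 'x').set (n.toNat - 1 - i) 'x' := by
    simp only [PySem.List.pySetD, PySem.List.pySet?, PySem.List.pyIdx?]
    rw [if_neg (by omega), if_pos (by simp; omega)]
    simp
    congr 1
    omega
  rw [hset, pv_brow_chars n i (by positivity) hin]
  apply congrArg
  have ha : (i : Int).toNat < n.toNat := by omega
  rw [pv_row_chars n.toNat (i:Int).toNat (n.toNat - 1 - i) ha (by omega)]
  apply List.map_congr_left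
  intro j hj
  simp only [List.mem_range] at hj
  congr 1
  simp only [eq_iff_iff, Int.toNat_natCast]
  constructor <;> intro hc <;> rcases hc with hc | hc <;> [left; right; left; right] <;> omega

theorem pv_mid_eq (n : Int) (hn : 3 ≤ n) (hodd : n % 2 = 1) :
    String.ofList (PySem.List.pySetD (pv_get_row n) (n / 2) 'x') = pvBRow n (n / 2) := by
  have hk2 : (0:Int) ≤ n / 2 := by omega
  unfold pv_get_row
  rw [PySem.List.pySetD_of_nonneg _ _ hk2, pv_brow_chars n (n / 2) hk2 (by omega)]
  apply congrArg
  rw [← List.set_set (a := 'x') (b := 'x'),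
      pv_row_chars n.toNat (n / 2).toNat (n / 2).toNat (by omega) (by omega)]
  apply List.map_congr_left
  intro j hj
  simp only [List.mem_range] at hj
  split_ifs <;> first | rfl | omega

theorem pv_draw_eq (n : Int) : draw_a_cross n = draw_a_cross_alt n := by
  unfold draw_a_cross draw_a_cross_alt
  by_cases h3 : n < 3
  · simp [h3]
  · rw [if_neg h3, if_neg h3]
    by_cases h2 : PySem.Int.mod n 2 = 0
    · rw [if_pos h2, if_pos h2]
    · rw [if_neg h2, if_neg h2]
      change PySem.Str.join "\n" ((PySem.List.pyRange 0 (PySem.Int.floordiv n 2)).map (pvARow n)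
          ++ [String.ofList (PySem.List.pySetD (pv_get_row n) (PySem.Int.floordiv n 2) 'x')]
          ++ ((PySem.List.pyRange 0 (PySem.Int.floordiv n 2)).map (pvARow n)).reverse) = _
      apply congrArg
      have hn : 3 ≤ n := by omega
      have hodd : n % 2 = 1 := by
        simp [PySem.Int.mod, Int.fmod_eq_emod] at h2
        omega
      have hk : PySem.Int.floordiv n 2 = n / 2 := by
        simp [PySem.Int.floordiv, Int.fdiv_eq_ediv]
      rw [hk, PySem.List.pyRange_one, PySem.List.pyRange_one, List.map_map, List.map_map]
      simp only [sub_zero]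
      apply List.ext_getElem
      · simp
        omega
      · intro j hj1 hj2
        simp only [List.length_map, List.length_range] at hj2
        conv_rhs => rw [List.getElem_map]
        simp only [Function.comp_apply, List.getElem_range, zero_add]
        rw [List.getElem_append]
        by_cases hle : j < (n / 2).toNat + 1
        · rw [dif_pos (by simp; omega)]
          rw [List.getElem_append]
          by_cases hlt : j < (n / 2).toNat
          · rw [dif_pos (by simp; omega)]
            rw [List.getElem_map]
            simp only [Function.comp_apply, List.getElem_range]
            exact pv_arow_eq n j (by rw [hk]; omega) hn
          · -- j = n/2 : the middle row
            have hjK : j = (n / 2).toNat := by omega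
            rw [dif_neg (by simp; omega)]
            simp only [List.length_map, List.length_range]
            rw [List.getElem_singleton, pv_mid_eq n hn hodd]
            congr 1
            omega
        · -- j > n/2 : the mirrored second half
          rw [dif_neg (by simp; omega)]
          rw [List.getElem_reverse, List.getElem_map]
          simp only [Function.comp_apply, List.getElem_range, zero_add, List.length_map,
            List.length_range, List.length_append, List.length_cons, List.length_nil]
          rw [show (n / 2).toNat - 1 - (j - ((n / 2).toNat + 1)) = 2 * (n / 2).toNat - j by omega]
          rw [pv_arow_eq n (2 * (n / 2).toNat - j) (by rw [hk]; omega) hn]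
          rw [pv_brow_symm n ((2 * (n / 2).toNat - j : Nat) : Int)]
          congr 1
          omega

-- ===== VERDICT (by name: the statement is the Claim_ definition above) =====
theorem draw_a_cross_spec : Claim_equal_draw_a_cross := by
  intro n _
  unfold Spec_draw_a_cross
  exact pv_draw_eq n
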